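-- pv_equiv track=rewrite | github.com/A7laundry/a7-intelligence-meta | optimizer.py | _extract_conversions
-- ===== SOURCE A (Python) =====
-- def _extract_conversions(actions_list: list) -> int:
--     """Extrai número de conversões relevantes."""
--     priority_actions = [
--         "onsite_conversion.messaging_conversation_started_7d",
--         "offsite_conversion.fb_pixel_lead",
--         "lead",
--     ]
--
--     for action_type in priority_actions:
--         for action in actions_list:
--             if action.get("action_type") == action_type:
--                 return int(action.get("value", 0))
--     return 0
-- ===== SOURCE B (Python) =====
-- def _extract_conversions(actions_list: list) -> int:
--     """Extrai número de conversões relevantes."""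
--     priority_actions = [
--         "onsite_conversion.messaging_conversation_started_7d",
--         "offsite_conversion.fb_pixel_lead",
--         "lead",
--     ]
--     wanted = set(priority_actions)
--     table = {}
--     for action in actions_list:
--         t = action.get("action_type")
--         if t in wanted and t not in table:
--             table[t] = action.get("value", 0)
--     for t in priority_actions:
--         if t in table:
--             return int(table[t])
--     return 0
-- ===== Notes on version B (the rewrite author's own statement) =====
-- stated objective: alternative
-- what changed: B replaces A's per-priority rescans of actions_list with a single pass that builds a first-occurrence-wins dict index keyed by action_type, then one scan of the priority list.
import Mathlib
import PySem

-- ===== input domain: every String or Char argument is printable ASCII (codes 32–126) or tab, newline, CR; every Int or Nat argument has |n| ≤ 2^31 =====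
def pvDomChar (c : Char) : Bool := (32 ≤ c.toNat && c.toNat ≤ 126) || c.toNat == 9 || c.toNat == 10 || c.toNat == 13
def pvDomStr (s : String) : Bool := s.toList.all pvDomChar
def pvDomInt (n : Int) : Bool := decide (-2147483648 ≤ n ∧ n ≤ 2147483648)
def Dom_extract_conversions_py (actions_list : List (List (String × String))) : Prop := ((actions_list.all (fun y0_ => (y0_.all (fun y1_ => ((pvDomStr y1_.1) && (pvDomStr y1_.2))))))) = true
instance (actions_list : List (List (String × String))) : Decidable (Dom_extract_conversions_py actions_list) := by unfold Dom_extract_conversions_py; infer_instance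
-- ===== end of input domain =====

-- B replaces A's per-priority rescans with one indexing pass (first-occurrence-wins dict) plus one priority scan; equivalence of return values on Pre_.

-- shared primitives: the priority list, dict.get on an action (first match), and int(x) for x = str or the int-0 default
def pvPriority : List String :=
  ["onsite_conversion.messaging_conversation_started_7d",
   "offsite_conversion.fb_pixel_lead",
   "lead"]

def pvGet (a : List (String × String)) (k : String) : Option String :=
  (a.find? (fun p => p.1 == k)).map (·.2)

-- int(action.get("value", 0)): none is the int default 0; on a string, Python int(s) (Pre_ excludes the ValueError case)
def pvValToInt (v : Option String) : Int :=
  match v with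
  | none => 0
  | some s => (PySem.Int.ofStr? s).getD 0

-- ===== PORT A =====
-- inner loop: first action whose action_type equals t, returning its raw "value" lookup
def pvInnerA (t : String) : List (List (String × String)) → Option (Option String)
  | [] => none
  | a :: rest =>
    if pvGet a "action_type" == some t then some (pvGet a "value") else pvInnerA t rest

-- outer loop over the priority types
def pvOuterA : List String → List (List (String × String)) → Int
  | [], _ => 0
  | t :: ts, al =>
    match pvInnerA t al with
    | some v => pvValToInt v
    | none => pvOuterA ts al

def extract_conversions_py (actions_list : List (List (String × String))) : Int :=
  pvOuterA pvPriority actions_list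

-- ===== PORT B =====
-- first pass: index action_type → raw value, first occurrence wins
def pvStep (d : PySem.Dict String (Option String)) (a : List (String × String)) :
    PySem.Dict String (Option String) :=
  match pvGet a "action_type" with
  | some t => if pvPriority.contains t && !(d.contains t) then d.insert t (pvGet a "value") else d
  | none => d

def pvBuild (al : List (List (String × String))) : PySem.Dict String (Option String) :=
  al.foldl pvStep PySem.Dict.empty

-- second pass: first priority type present in the table
def pvLookupB : List String → PySem.Dict String (Option String) → Int
  | [], _ => 0
  | t :: ts, d =>
    match d.get? t with
    | some v => pvValToInt v
    | none => pvLookupB ts d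

def extract_conversions_py_alt (actions_list : List (List (String × String))) : Int :=
  pvLookupB pvPriority (pvBuild actions_list)

-- ===== PRECONDITION & SPEC =====
-- Pre_ excludes exactly the inputs where A raises ValueError: the action A selects (first action of the
-- first occurring priority type) has a "value" string that int() cannot parse.
def Pre_extract_conversions_py (actions_list : List (List (String × String))) : Prop :=
  ((pvPriority.findSome? (fun t =>
      actions_list.find? (fun a => pvGet a "action_type" == some t))).all
    (fun a => (pvGet a "value").all (fun s => (PySem.Int.ofStr? s).isSome))) = true
instance (actions_list : List (List (String × String))) : Decidable (Pre_extract_conversions_py actions_list) := by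
  unfold Pre_extract_conversions_py; infer_instance

def pvWitness_extract_conversions_py : (List (List (String × String))) :=
  [[("action_type", "lead"), ("value", "7")], [("action_type", "x"), ("value", "zzz")]]

def Spec_extract_conversions_py (actions_list : List (List (String × String))) (out : Int) : Prop := out = extract_conversions_py_alt actions_list
instance (actions_list : List (List (String × String))) (out : Int) : Decidable (Spec_extract_conversions_py actions_list out) := by unfold Spec_extract_conversions_py; infer_instance

-- ===== CLAIM (what is proved, stated in full; the proofs are below) =====
def Claim_equal_extract_conversions_py : Prop := ∀ (actions_list : List (List (String × String))), Dom_extract_conversions_py actions_list → Pre_extract_conversions_py actions_list → Spec_extract_conversions_py actions_list (extract_conversions_py actions_list)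

-- ===== LEMMAS AND PROOFS =====

-- the table lookup for a priority type t is exactly A's inner scan for t
theorem pvBuild_get (t : String) (ht : pvPriority.contains t = true) :
    ∀ (al : List (List (String × String))) (d : PySem.Dict String (Option String)),
      (al.foldl pvStep d).get? t = (d.get? t).or (pvInnerA t al) := by
  intro al
  induction al with
  | nil => intro d; simp [pvInnerA]
  | cons a rest ih =>
    intro d
    rw [List.foldl_cons, ih (pvStep d a)]
    cases hat : pvGet a "action_type" with
    | none =>
      simp [pvStep, pvInnerA, hat]
    | some t' =>
      by_cases hte : t' = t
      · subst hte
        cases hc : d.contains t' with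
        | true =>
          have hstep : pvStep d a = d := by
            simp [pvStep, hat, hc]
          have hs : (d.get? t').isSome := by
            rw [← PySem.Dict.contains_eq_isSome_get?]; exact hc
          obtain ⟨v, hv⟩ := Option.isSome_iff_exists.mp hs
          simp [hstep, pvInnerA, hat, hv]
        | false =>
          have hm : t' ∈ pvPriority := by simpa using ht
          have hstep : pvStep d a = d.insert t' (pvGet a "value") := by
            simp [pvStep, hat, hc, hm]
          have hn : d.get? t' = none := by
            cases hg : d.get? t' with
            | none => rfl
            | some v =>
              have : d.contains t' = true := by
                rw [PySem.Dict.contains_eq_isSome_get?, hg]; rfl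
              rw [this] at hc; cases hc
          simp [hstep, pvInnerA, hat, hn, PySem.Dict.get?_insert_self]
      · have hbe : (some t' == some t) = false := by
          simp [hte]
        have hstep : (pvStep d a).get? t = d.get? t := by
          cases hcond : pvPriority.contains t' && !(d.contains t') with
          | true =>
            have hs : pvStep d a = d.insert t' (pvGet a "value") := by
              unfold pvStep; rw [hat]
              show (if pvPriority.contains t' && !(d.contains t') then d.insert t' (pvGet a "value") else d) = _
              rw [if_pos hcond]
            rw [hs]
            exact PySem.Dict.get?_insert_of_ne _ _ (fun h => hte h.symm)
          | false =>
            have hs : pvStep d a = d := by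
              unfold pvStep; rw [hat]
              show (if pvPriority.contains t' && !(d.contains t') then d.insert t' (pvGet a "value") else d) = _
              rw [if_neg (by rw [hcond]; exact Bool.false_ne_true)]
            rw [hs]
        simp [hstep, pvInnerA, hat, hbe]

theorem pvLookup_eq (al : List (List (String × String))) :
    ∀ (ts : List String), (∀ t ∈ ts, pvPriority.contains t = true) →
      pvLookupB ts (pvBuild al) = pvOuterA ts al := by
  intro ts
  induction ts with
  | nil => intro _; rfl
  | cons t ts ih =>
    intro h
    have ht := h t (List.mem_cons_self ..)
    have hget : (pvBuild al).get? t = pvInnerA t al := by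
      unfold pvBuild
      rw [pvBuild_get t ht al PySem.Dict.empty]
      simp [PySem.Dict.get?_empty]
    simp only [pvLookupB, pvOuterA, hget]
    cases pvInnerA t al with
    | none => exact ih (fun x hx => h x (List.mem_cons_of_mem _ hx))
    | some v => rfl

-- ===== VERDICT (by name: the statement is the Claim_ definition above) =====
theorem extract_conversions_py_spec : Claim_equal_extract_conversions_py := by
  intro al _ _
  unfold Spec_extract_conversions_py extract_conversions_py extract_conversions_py_alt
  exact (pvLookup_eq al pvPriority (fun t ht => by simpa using ht)).symm
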